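-- pv_equiv track=rewrite | github.com/carrdelling/AdventOfCode2020 | day6/silver.py | solve
-- ===== SOURCE A (Python) =====
-- def process(text):
--
--     diff = {a for x in text for a in list(x) if a not in {' ', '\n'}}
--
--     return len(diff)
--
-- def solve(data):
--
--     solution = 0
--
--     answers = []
--     for row in data:
--
--         if len(row) > 0:
--             answers.append(row)
--         else:
--             solution += process(answers)
--             answers = []
--     else:
--         solution += process(answers)
--
--     return solution
-- ===== SOURCE B (Python) =====
-- def solve(data):
--     # One pass, no per-group buffering: tag each relevant character with the
--     # index of the group it belongs to and collect the (group, char) pairs in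
--     # a single global set; the answer is the size of that set, since groups
--     # with different indices contribute disjoint pairs.
--     seen = set()
--     gid = 0
--     for row in data:
--         if row:
--             for ch in row:
--                 if ch not in (' ', '\n'):
--                     seen.add((gid, ch))
--         else:
--             gid += 1
--     return len(seen)
-- ===== Notes on version B (the rewrite author's own statement) =====
-- stated objective: alternative
-- what changed: A buffers each group's rows and flushes a per-group set of characters into a running sum (with for-else trailing-group handling); B never forms groups at all: it keeps a single global set of (group-index, character) pairs built in one pass and returns its size.
import Mathlib
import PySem

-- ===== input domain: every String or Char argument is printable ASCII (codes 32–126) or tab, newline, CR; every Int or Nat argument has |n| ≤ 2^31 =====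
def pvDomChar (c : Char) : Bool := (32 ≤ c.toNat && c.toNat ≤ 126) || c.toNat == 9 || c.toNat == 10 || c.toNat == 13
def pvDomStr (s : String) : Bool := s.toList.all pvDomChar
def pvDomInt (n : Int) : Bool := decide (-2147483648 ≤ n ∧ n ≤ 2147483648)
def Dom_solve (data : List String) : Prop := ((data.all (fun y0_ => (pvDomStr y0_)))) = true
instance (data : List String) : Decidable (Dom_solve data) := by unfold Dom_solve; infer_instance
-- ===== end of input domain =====

-- B replaces A's buffer-and-flush per-group accumulation by a single global set of
-- (group-index, character) pairs built in one pass; objective: alternative.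

-- shared transliteration of Python's `c not in {' ', '\n'}`
def pvKeep (c : Char) : Bool := !(c == ' ' || c == '\n')

-- ===== PORT A =====
-- {a for x in text for a in list(x) if a not in {' ', '\n'}} then len
def process (text : List String) : Int :=
  PySem.Set.len (PySem.Set.ofList ((text.flatMap String.toList).filter pvKeep))

def solve (data : List String) : Int :=
  let st := data.foldl
    (fun (st : Int × List String) row =>
      if PySem.Str.len row > 0 then (st.1, st.2 ++ [row])
      else (st.1 + process st.2, []))
    (0, [])
  -- for-else: the trailing group is always flushed
  st.1 + process st.2

-- ===== PORT B =====
def solve_alt (data : List String) : Int :=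
  let st := data.foldl
    (fun (st : Int × PySem.Set (Int × Char)) row =>
      if row ≠ "" then
        (st.1,
         row.toList.foldl
           (fun s ch => if pvKeep ch then PySem.Set.add s (st.1, ch) else s) st.2)
      else (st.1 + 1, st.2))
    (0, PySem.Set.empty)
  PySem.Set.len st.2

-- ===== PRECONDITION & SPEC =====
def Spec_solve (data : List String) (out : Int) : Prop := out = solve_alt data
instance (data : List String) (out : Int) : Decidable (Spec_solve data out) := by unfold Spec_solve; infer_instance

-- ===== CLAIM (what is proved, stated in full; the proofs are below) =====
def Claim_equal_solve : Prop := ∀ (data : List String), Dom_solve data → Spec_solve data (solve data)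

-- ===== LEMMAS AND PROOFS =====

lemma pv_len_pos_iff (row : String) : (PySem.Str.len row > 0) ↔ row ≠ "" := by
  constructor
  · intro h hr; subst hr; simp [PySem.Str.len] at h
  · intro h
    have hl : row.toList ≠ [] := fun hc => h (by rw [← String.toList_inj]; simpa using hc)
    have h2 : 0 < row.toList.length := List.length_pos_iff.mpr hl
    simpa [PySem.Str.len_eq] using h2

-- folding add over a filtered list = folding add-if over the list
lemma pv_foldl_filter (cs : List Char) (s : PySem.Set Char) :
    (cs.filter pvKeep).foldl PySem.Set.add s
      = cs.foldl (fun s ch => if pvKeep ch then PySem.Set.add s ch else s) s := by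
  induction cs generalizing s with
  | nil => rfl
  | cons c t ih =>
    by_cases h : pvKeep c
    · simp [h, ih]
    · simp [h, ih]

-- one row's inner loop preserves the invariant, in step with the group's char set
lemma pv_inner (cs : List Char) (seen : PySem.Set (Int × Char)) (K : PySem.Set Char)
    (gid sol : Int)
    (h1 : PySem.Set.len seen = sol + PySem.Set.len K)
    (h2 : ∀ c : Char, (gid, c) ∈ seen ↔ c ∈ K)
    (h3 : ∀ p ∈ seen, p.1 ≤ gid) :
    (PySem.Set.len (cs.foldl (fun s ch => if pvKeep ch then PySem.Set.add s (gid, ch) else s) seen)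
        = sol + PySem.Set.len (cs.foldl (fun s ch => if pvKeep ch then PySem.Set.add s ch else s) K))
    ∧ (∀ c : Char,
        (gid, c) ∈ cs.foldl (fun s ch => if pvKeep ch then PySem.Set.add s (gid, ch) else s) seen
          ↔ c ∈ cs.foldl (fun s ch => if pvKeep ch then PySem.Set.add s ch else s) K)
    ∧ (∀ p ∈ cs.foldl (fun s ch => if pvKeep ch then PySem.Set.add s (gid, ch) else s) seen,
        p.1 ≤ gid) := by
  induction cs generalizing seen K with
  | nil => exact ⟨h1, h2, h3⟩
  | cons c t ih =>
    by_cases hk : pvKeep c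
    · simp only [List.foldl_cons, if_pos hk]
      by_cases hm : c ∈ K
      · have hm' : (gid, c) ∈ seen := (h2 c).mpr hm
        rw [PySem.Set.add_of_mem hm', PySem.Set.add_of_mem hm]
        exact ih seen K h1 h2 h3
      · have hm' : (gid, c) ∉ seen := fun h => hm ((h2 c).mp h)
        rw [PySem.Set.add_of_not_mem hm', PySem.Set.add_of_not_mem hm]
        refine ih _ _ ?_ ?_ ?_
        · simp [PySem.Set.len] at h1 ⊢; omega
        · intro c'
          simp [h2 c']
        · intro p hp
          rcases List.mem_append.mp hp with h | h
          · exact h3 p h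
          · simp at h; subst h; exact le_refl _
    · simp only [List.foldl_cons, if_neg hk]
      exact ih seen K h1 h2 h3

-- the two folds, run in step from any invariant-related pair of states, agree
lemma pv_main (data : List String) :
    ∀ (sol gid : Int) (cur : List String) (seen : PySem.Set (Int × Char)),
    PySem.Set.len seen = sol + process cur →
    (∀ c : Char, (gid, c) ∈ seen ↔ c ∈ PySem.Set.ofList ((cur.flatMap String.toList).filter pvKeep)) →
    (∀ p ∈ seen, p.1 ≤ gid) →
    ((data.foldl
        (fun (st : Int × List String) row =>
          if PySem.Str.len row > 0 then (st.1, st.2 ++ [row])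
          else (st.1 + process st.2, []))
        (sol, cur)).1
      + process ((data.foldl
        (fun (st : Int × List String) row =>
          if PySem.Str.len row > 0 then (st.1, st.2 ++ [row])
          else (st.1 + process st.2, []))
        (sol, cur)).2))
    = PySem.Set.len ((data.foldl
        (fun (st : Int × PySem.Set (Int × Char)) row =>
          if row ≠ "" then
            (st.1,
             row.toList.foldl
               (fun s ch => if pvKeep ch then PySem.Set.add s (st.1, ch) else s) st.2)
          else (st.1 + 1, st.2))
        (gid, seen)).2) := by
  induction data with
  | nil =>
    intro sol gid cur seen h1 _ _
    simpa using h1.symm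
  | cons row t ih =>
    intro sol gid cur seen h1 h2 h3
    by_cases h : row = ""
    · subst h
      have hc : ¬ (PySem.Str.len "" > 0) := by simp [PySem.Str.len]
      simp only [List.foldl_cons, if_neg hc, ne_eq, not_true_eq_false, if_false]
      refine ih (sol + process cur) (gid + 1) [] seen ?_ ?_ ?_
      · rw [h1]; simp [process, PySem.Set.len]
      · intro c
        constructor
        · intro hmem
          have := h3 _ hmem
          simp at this
        · intro hmem; simp [PySem.Set.ofList] at hmem
      · intro p hp
        have := h3 p hp; omega
    · have hc : PySem.Str.len row > 0 := (pv_len_pos_iff row).mpr h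
      simp only [List.foldl_cons, if_pos hc, ne_eq, h, not_false_eq_true, if_true]
      have hK : ∀ c : Char, (gid, c) ∈ seen ↔ c ∈ PySem.Set.ofList ((cur.flatMap String.toList).filter pvKeep) := h2
      obtain ⟨g1, g2, g3⟩ := pv_inner row.toList seen
        (PySem.Set.ofList ((cur.flatMap String.toList).filter pvKeep)) gid sol h1 hK h3
      have hchars : ((cur ++ [row]).flatMap String.toList).filter pvKeep
          = ((cur.flatMap String.toList).filter pvKeep) ++ (row.toList.filter pvKeep) := by
        simp [List.flatMap_append, List.filter_append]
      have hofs : PySem.Set.ofList (((cur ++ [row]).flatMap String.toList).filter pvKeep)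
          = row.toList.foldl (fun s ch => if pvKeep ch then PySem.Set.add s ch else s)
              (PySem.Set.ofList ((cur.flatMap String.toList).filter pvKeep)) := by
        rw [hchars, PySem.Set.ofList_append, PySem.Set.update, ← pv_foldl_filter]
      refine ih sol gid (cur ++ [row]) _ ?_ ?_ g3
      · rw [g1]; simp only [process, hofs]
      · intro c; rw [g2 c, hofs]

-- ===== VERDICT (by name: the statement is the Claim_ definition above) =====
theorem solve_spec : Claim_equal_solve := by
  intro data _
  show solve data = solve_alt data
  have := pv_main data 0 0 [] PySem.Set.empty
    (by simp [process, PySem.Set.len, PySem.Set.empty])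
    (by intro c; simp [PySem.Set.empty, PySem.Set.ofList])
    (by intro p hp; simp [PySem.Set.empty] at hp)
  simpa [solve, solve_alt] using this
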